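-- pv_equiv track=rewrite | github.com/David-Kyrat/12X001-Algos-TPs | TP06/exo1.py | get_incident_edges
-- ===== SOURCE A (Python) =====
-- def edges(matrix: list[list[int]]) -> list[tuple[int, int]]:
--     """ Returns the list of edges of the graph represented by the given adjacency matrix."""
--     return [(i, j) for i in range(len(matrix)) for j in range(len(matrix[i])) if matrix[i][j] == 1]
--
-- def get_incident_edges(matrix: list[list[int]], edge:tuple[int, int]):
--     u, v = edge
--     edgesl = edges(matrix)
--     return [e for e in edgesl if u not in e and v not in e]
--
-- #def rm_incident_edges(edges: list[tuple[int, int]], edge:tuple[int, int]) -> list[tuple[int, int]]: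
--     """Removes all edges incident to the given edge from ``edges``."""
--     #u, v = edge[0], edge[1]
--     """ for j, el in enumerate(matrix[u]):
--         if el == 1:
--             edges.remove((u, j))
--             s.add((u, j))
--     for i, row in enumerate(matrix):
--         if row[v] == 1 and (i, v) not in s:
--             edges.remove((i, v)) """
-- ===== SOURCE B (Python) =====
-- def get_incident_edges(matrix, edge):
--     u, v = edge
--     out = []
--     for i, row in enumerate(matrix):
--         if i == u or i == v:
--             continue
--         for j, val in enumerate(row):
--             if val == 1 and j != u and j != v:
--                 out.append((i, j))
--     return out
-- ===== Notes on version B (the rewrite author's own statement) =====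
-- stated objective: simpler
-- what changed: Single fused pass over the matrix with explicit index comparisons (rows/columns u and v skipped inline), replacing the build-all-edges helper plus a second filtering pass with tuple membership tests.
import Mathlib
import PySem

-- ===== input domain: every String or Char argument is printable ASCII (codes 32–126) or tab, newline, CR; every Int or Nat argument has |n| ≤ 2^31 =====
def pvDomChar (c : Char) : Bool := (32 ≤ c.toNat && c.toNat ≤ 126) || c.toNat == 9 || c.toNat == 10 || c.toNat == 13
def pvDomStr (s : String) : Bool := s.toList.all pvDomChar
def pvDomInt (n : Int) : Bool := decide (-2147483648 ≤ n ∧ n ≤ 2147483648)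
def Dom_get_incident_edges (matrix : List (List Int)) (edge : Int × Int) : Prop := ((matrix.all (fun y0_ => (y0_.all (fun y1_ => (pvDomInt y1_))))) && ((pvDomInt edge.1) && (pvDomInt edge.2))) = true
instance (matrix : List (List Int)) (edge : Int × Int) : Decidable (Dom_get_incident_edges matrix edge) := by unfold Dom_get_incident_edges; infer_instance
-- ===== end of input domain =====

set_option maxRecDepth 4000

-- B fuses A's edge-building helper and filtering pass into one nested loop with explicit index comparisons (objective: simpler).


-- ===== PORT A =====
-- helper 'edges': [(i, j) for i in range(len(matrix)) for j in range(len(matrix[i])) if matrix[i][j] == 1]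
def pyEdges (matrix : List (List Int)) : List (Int × Int) :=
  (List.range matrix.length).flatMap (fun i =>
    (List.range (matrix.getD i []).length).flatMap (fun j =>
      if (matrix.getD i []).getD j 0 = 1 then [((i : Int), (j : Int))] else []))

def get_incident_edges (matrix : List (List Int)) (edge : Int × Int) : List (Int × Int) :=
  let u := edge.1
  let v := edge.2
  (pyEdges matrix).filter (fun e => decide (¬(u = e.1 ∨ u = e.2) ∧ ¬(v = e.1 ∨ v = e.2)))

-- ===== PORT B =====
-- inner loop: for j, val in enumerate(row): append (i,j) if val == 1 and j != u and j != v
def altCols (u v i : Int) : Int → List Int → List (Int × Int)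
  | _, [] => []
  | j, x :: rest =>
      if x = 1 ∧ j ≠ u ∧ j ≠ v then (i, j) :: altCols u v i (j + 1) rest
      else altCols u v i (j + 1) rest

-- outer loop: for i, row in enumerate(matrix): skip rows u and v
def altRows (u v : Int) : Int → List (List Int) → List (Int × Int)
  | _, [] => []
  | i, row :: rest =>
      if i = u ∨ i = v then altRows u v (i + 1) rest
      else altCols u v i 0 row ++ altRows u v (i + 1) rest

def get_incident_edges_alt (matrix : List (List Int)) (edge : Int × Int) : List (Int × Int) :=
  altRows edge.1 edge.2 0 matrix

-- ===== PRECONDITION & SPEC =====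
def Spec_get_incident_edges (matrix : List (List Int)) (edge : Int × Int) (out : List (Int × Int)) : Prop := out = get_incident_edges_alt matrix edge
instance (matrix : List (List Int)) (edge : Int × Int) (out : List (Int × Int)) : Decidable (Spec_get_incident_edges matrix edge out) := by unfold Spec_get_incident_edges; infer_instance

-- ===== CLAIM (what is proved, stated in full; the proofs are below) =====
def Claim_equal_get_incident_edges : Prop := ∀ (matrix : List (List Int)) (edge : Int × Int), Dom_get_incident_edges matrix edge → Spec_get_incident_edges matrix edge (get_incident_edges matrix edge)

-- ===== LEMMAS AND PROOFS =====

-- a row with index u or v contributes nothing after A's filter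
lemma cols_dead (u v i : Int) (hi : i = u ∨ i = v) (row : List Int) :
    ((List.range row.length).flatMap (fun j =>
        if row.getD j 0 = 1 then [(i, (j : Int))] else [])).filter
      (fun e => decide (¬(u = e.1 ∨ u = e.2) ∧ ¬(v = e.1 ∨ v = e.2))) = [] := by
  rw [List.filter_eq_nil_iff]
  intro a ha
  simp only [List.mem_flatMap, List.mem_range] at ha
  obtain ⟨j, _, hj⟩ := ha
  split at hj
  · simp at hj
    subst hj
    simp only [decide_eq_true_eq]
    tauto
  · simp at hj

-- a row with index i ∉ {u,v}: A's filtered inner comprehension = B's inner loop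
lemma cols_eq (u v i : Int) (hu : i ≠ u) (hv : i ≠ v) :
    ∀ (row : List Int) (j0 : Nat),
    ((List.range row.length).flatMap (fun j =>
        if row.getD j 0 = 1 then [(i, ((j0 + j : Nat) : Int))] else [])).filter
      (fun e => decide (¬(u = e.1 ∨ u = e.2) ∧ ¬(v = e.1 ∨ v = e.2)))
      = altCols u v i (j0 : Int) row := by
  intro row
  induction row with
  | nil => intro j0; simp [altCols]
  | cons x rest ih =>
    intro j0
    rw [show (x :: rest).length = rest.length + 1 from rfl, List.range_succ_eq_map,
        List.flatMap_cons, List.flatMap_map]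
    have hfun : (fun (a : Nat) => if (x :: rest).getD a.succ 0 = 1 then [(i, ((j0 + a.succ : Nat) : Int))] else [])
        = (fun j => if rest.getD j 0 = 1 then [(i, (((j0 + 1) + j : Nat) : Int))] else []) := by
      funext a
      have h : j0 + a.succ = (j0 + 1) + a := by omega
      simp only [Nat.succ_eq_add_one, List.getD_cons_succ, h]
    rw [hfun]
    rw [List.filter_append, ih (j0 + 1)]
    have hc : ((j0 + 1 : Nat) : Int) = (j0 : Int) + 1 := by push_cast; ring
    rw [hc]
    simp only [List.getD_cons_zero, Nat.add_zero, altCols]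
    split_ifs with h1 h2 h2
    · obtain ⟨_, hju, hjv⟩ := h2
      simp [Ne.symm hu, Ne.symm hv, Ne.symm hju, Ne.symm hjv]
    · have hj : ((j0 : Nat) : Int) = u ∨ ((j0 : Nat) : Int) = v := by tauto
      rcases hj with h | h <;> simp [← h]
    · exact absurd h2.1 h1
    · simp

-- the outer comprehension, filtered, equals B's outer loop
lemma rows_eq (u v : Int) :
    ∀ (m : List (List Int)) (k : Nat),
    ((List.range m.length).flatMap (fun i =>
        (List.range ((m.getD i []).length)).flatMap (fun j =>
          if (m.getD i []).getD j 0 = 1 then [(((k + i : Nat) : Int), (j : Int))] else []))).filter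
      (fun e => decide (¬(u = e.1 ∨ u = e.2) ∧ ¬(v = e.1 ∨ v = e.2)))
      = altRows u v (k : Int) m := by
  intro m
  induction m with
  | nil => intro k; simp [altRows]
  | cons row rest ih =>
    intro k
    rw [show (row :: rest).length = rest.length + 1 from rfl, List.range_succ_eq_map,
        List.flatMap_cons, List.flatMap_map]
    have hfun : (fun (a : Nat) => (List.range (((row :: rest).getD a.succ []).length)).flatMap (fun j =>
          if ((row :: rest).getD a.succ []).getD j 0 = 1 then [(((k + a.succ : Nat) : Int), (j : Int))] else []))
        = (fun i => (List.range ((rest.getD i []).length)).flatMap (fun j =>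
          if (rest.getD i []).getD j 0 = 1 then [((((k + 1) + i : Nat) : Int), (j : Int))] else [])) := by
      funext a
      have h : k + a.succ = (k + 1) + a := by omega
      simp only [Nat.succ_eq_add_one, List.getD_cons_succ, h]
    rw [hfun]
    rw [List.filter_append, ih (k + 1)]
    have hc : ((k + 1 : Nat) : Int) = (k : Int) + 1 := by push_cast; ring
    rw [hc]
    simp only [List.getD_cons_zero, Nat.add_zero, altRows]
    by_cases hk : (k : Int) = u ∨ (k : Int) = v
    · rw [if_pos hk, cols_dead u v (k : Int) hk row, List.nil_append]
    · rw [if_neg hk]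
      have hk' : (k : Int) ≠ u ∧ (k : Int) ≠ v := by tauto
      have hcols := cols_eq u v (k : Int) hk'.1 hk'.2 row 0
      simp only [Nat.zero_add] at hcols
      rw [hcols, Nat.cast_zero]

-- ===== VERDICT (by name: the statement is the Claim_ definition above) =====
theorem get_incident_edges_spec : Claim_equal_get_incident_edges := by
  intro matrix edge _
  unfold Spec_get_incident_edges get_incident_edges get_incident_edges_alt pyEdges
  have := rows_eq edge.1 edge.2 matrix 0
  simp only [Nat.zero_add, Nat.cast_zero] at this
  exact this
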